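-- pv_equiv track=rewrite | github.com/floriandotpy/advent-of-code-2020 | day-7/day-7.py | count_outer_colors
-- ===== SOURCE A (Python) =====
-- def count_outer_colors(color, inverse_rules, acc_result=None):
--     """
--     Counts in how many differently colored bags a bag of the color `color` can be contained.
--     """
--
--     # accumulator variable: accumulate result during recursive calls
--     acc_result = acc_result or set()
--
--     # which bags can contain the color `color`?
--     outer_colors = inverse_rules.get(color)
--
--     # this color can only occur as the outermost bag? recursion end.
--     if not outer_colors:
--         return set()
--
--     # `color` can be contained in (potentially) multiple different color
--     for outer_color in outer_colors:
--
--         # remember color in accumulator (for final result)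
--         acc_result.add(outer_color)
--
--         # recursion: look one level of bags higher
--         recurse_result = count_outer_colors(outer_color, inverse_rules)
--         acc_result.update(recurse_result)
--
--     return acc_result
-- ===== SOURCE B (Python) =====
-- def count_outer_colors(color, inverse_rules, acc_result=None):
--     """
--     Set of all colors whose bags can (transitively) contain a `color` bag.
--
--     Rewrite as one depth-first traversal of the `inverse_rules` graph with
--     an `explored` set, so every color is expanded at most once (the
--     original re-explores a color's ancestors once per path to it).
--     Unlike the original it does not mutate a passed-in `acc_result` set;
--     the return value is the same.
--     """
--     outer_colors = inverse_rules.get(color)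
--     if not outer_colors:
--         return set()
--     result = set(acc_result) if acc_result else set()
--     explored = set()
--
--     def visit(c):
--         result.add(c)
--         for nxt in inverse_rules.get(c) or ():
--             if nxt not in explored:
--                 visit(nxt)
--         explored.add(c)
--
--     for outer_color in outer_colors:
--         if outer_color not in explored:
--             visit(outer_color)
--     return result
-- ===== Notes on version B (the rewrite author's own statement) =====
-- stated objective: alternative
-- what changed: A recurses blindly into every parent color (re-deriving a color's ancestor set once per occurrence); B instead performs one depth-first traversal of the inverse_rules graph with an explored set, expanding each color at most once; B does not mutate a passed-in acc_result set (return value identical).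
import Mathlib
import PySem

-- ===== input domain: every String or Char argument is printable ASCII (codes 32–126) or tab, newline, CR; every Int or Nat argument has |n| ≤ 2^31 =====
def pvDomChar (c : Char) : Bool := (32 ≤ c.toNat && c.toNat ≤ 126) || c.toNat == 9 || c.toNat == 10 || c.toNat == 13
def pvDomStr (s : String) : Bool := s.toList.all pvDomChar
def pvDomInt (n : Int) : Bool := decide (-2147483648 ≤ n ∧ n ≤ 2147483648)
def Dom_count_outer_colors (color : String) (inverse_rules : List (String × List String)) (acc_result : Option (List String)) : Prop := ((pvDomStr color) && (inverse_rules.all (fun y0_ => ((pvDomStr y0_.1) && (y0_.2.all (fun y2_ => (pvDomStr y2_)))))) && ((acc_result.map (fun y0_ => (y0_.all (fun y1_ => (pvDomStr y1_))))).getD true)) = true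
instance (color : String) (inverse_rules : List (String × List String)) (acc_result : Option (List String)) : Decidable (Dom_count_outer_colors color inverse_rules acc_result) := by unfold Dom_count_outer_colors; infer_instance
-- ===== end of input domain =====

-- B replaces A's blind recursion (which re-derives a color's ancestor set once per
-- occurrence) by one depth-first traversal with an `explored` set, expanding each color
-- at most once; same return value everywhere A returns.  NOTE: Python A mutates a
-- passed-in acc_result set in place, B does not — the equivalence proved here is about
-- the RETURN value only.

-- `inverse_rules.get(color)`: None and [] are both falsy, so read a missing key as [].
def pvGet (rs : List (String × List String)) (c : String) : List String :=
  ((PySem.Dict.mk rs).get? c).getD []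

-- ===== PORT A =====
-- A is a recursion on the graph that does not terminate structurally (Python overflows the
-- stack on a reachable cycle), so the port carries a fuel counter; on inputs satisfying
-- Pre_count_outer_colors the recursion depth is at most rs.length + 2, so the fuel is never
-- exhausted there and the port is exact.
def pvCocA (rs : List (String × List String)) : Nat → String → Option (List String) → List String
  | 0, _, _ => []                                   -- fuel exhausted: only outside Pre_
  | fuel+1, color, accOpt =>
    -- acc_result = acc_result or set()   (an empty set is falsy; set(∅-or-None) = ∅)
    let acc : PySem.Set String := PySem.Set.ofList (accOpt.getD [])
    let outer := pvGet rs color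
    if outer = [] then []                           -- `if not outer_colors: return set()`
    else
      -- for outer_color in outer: acc.add(outer_color); acc.update(recurse(outer_color))
      outer.foldl
        (fun a oc => PySem.Set.update (PySem.Set.add a oc) (pvCocA rs fuel oc none)) acc

def count_outer_colors (color : String) (inverse_rules : List (String × List String)) (acc_result : Option (List String)) : List String :=
  pvCocA inverse_rules (inverse_rules.length + 2) color acc_result

-- ===== PORT B =====
-- `visit(c)`: result.add(c); recurse into unexplored parents; explored.add(c).
-- State is (explored, result); fuelled for the same reason as A's port.
def pvVisitB (rs : List (String × List String)) : Nat → String → (PySem.Set String × PySem.Set String) → (PySem.Set String × PySem.Set String)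
  | 0, _, s => s                                    -- fuel exhausted: only outside Pre_
  | f+1, c, s =>
    let t := (pvGet rs c).foldl
      (fun s nxt => if PySem.Set.contains s.1 nxt then s else pvVisitB rs f nxt s)
      (s.1, PySem.Set.add s.2 c)
    (PySem.Set.add t.1 c, t.2)

def count_outer_colors_alt (color : String) (inverse_rules : List (String × List String)) (acc_result : Option (List String)) : List String :=
  let outer := pvGet inverse_rules color
  if outer = [] then []
  else
    -- result = set(acc_result) if acc_result else set(); explored = set()
    let res0 : PySem.Set String := PySem.Set.ofList (acc_result.getD [])
    (outer.foldl
      (fun s oc => if PySem.Set.contains s.1 oc then s else pvVisitB inverse_rules (inverse_rules.length + 1) oc s)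
      (PySem.Set.empty, res0)).2

-- ===== PRECONDITION & SPEC =====
-- pvStep S = S together with every color one inverse step above a member of S.
def pvStepR (rs : List (String × List String)) (S : List String) : List String :=
  S.foldl (fun acc c => PySem.Set.update acc (pvGet rs c)) S

def pvIterR (rs : List (String × List String)) (S : List String) : Nat → List String
  | 0 => S
  | n+1 => pvIterR rs (pvStepR rs S) n

-- every color reachable from c in at least one inverse step (rs.length+1 expansions reach a fixpoint)
def pvReach (rs : List (String × List String)) (c : String) : List String :=
  pvIterR rs (pvGet rs c) (rs.length + 1)

-- Pre_: no color reachable from `color` can (transitively) contain itself — exactly the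
-- inputs on which Python A returns; on a reachable cycle A's recursion never ends
-- (RecursionError), so those inputs are excluded.
def Pre_count_outer_colors (color : String) (inverse_rules : List (String × List String)) (acc_result : Option (List String)) : Prop :=
  ∀ c ∈ pvReach inverse_rules color, c ∉ pvReach inverse_rules c

instance (color : String) (inverse_rules : List (String × List String)) (acc_result : Option (List String)) : Decidable (Pre_count_outer_colors color inverse_rules acc_result) := by unfold Pre_count_outer_colors; infer_instance

def pvWitness_count_outer_colors : String × (List (String × List String)) × Option (List String) :=
  ("shiny gold", [("shiny gold", ["bright white", "muted yellow"]), ("bright white", ["light red"])], some ["vibrant plum"])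

def Spec_count_outer_colors (color : String) (inverse_rules : List (String × List String)) (acc_result : Option (List String)) (out : List String) : Prop := out = count_outer_colors_alt color inverse_rules acc_result
instance (color : String) (inverse_rules : List (String × List String)) (acc_result : Option (List String)) (out : List String) : Decidable (Spec_count_outer_colors color inverse_rules acc_result out) := by unfold Spec_count_outer_colors; infer_instance

-- ===== CLAIM (what is proved, stated in full; the proofs are below) =====
def Claim_equal_count_outer_colors : Prop := ∀ (color : String) (inverse_rules : List (String × List String)) (acc_result : Option (List String)), Dom_count_outer_colors color inverse_rules acc_result → Pre_count_outer_colors color inverse_rules acc_result → Spec_count_outer_colors color inverse_rules acc_result (count_outer_colors color inverse_rules acc_result)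

-- ===== LEMMAS AND PROOFS =====

-- A's loop body, named for the proofs.
def pvStepA (rs : List (String × List String)) (f : Nat) (a : PySem.Set String) (oc : String) : PySem.Set String :=
  PySem.Set.update (PySem.Set.add a oc) (pvCocA rs f oc none)

-- B's inner fold, named for the proofs.
def pvFoldB (rs : List (String × List String)) (f : Nat) (s : PySem.Set String × PySem.Set String) (l : List String) : PySem.Set String × PySem.Set String :=
  l.foldl (fun s nxt => if PySem.Set.contains s.1 nxt then s else pvVisitB rs f nxt s) s

lemma pvCocA_succ (rs : List (String × List String)) (f : Nat) (c : String) (accOpt : Option (List String)) :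
    pvCocA rs (f+1) c accOpt =
      if pvGet rs c = [] then []
      else (pvGet rs c).foldl (pvStepA rs f) (PySem.Set.ofList (accOpt.getD [])) := rfl

lemma pvVisitB_succ (rs : List (String × List String)) (f : Nat) (c : String) (s : PySem.Set String × PySem.Set String) :
    pvVisitB rs (f+1) c s =
      ((pvFoldB rs f (s.1, PySem.Set.add s.2 c) (pvGet rs c)).1.add c,
       (pvFoldB rs f (s.1, PySem.Set.add s.2 c) (pvGet rs c)).2) := rfl

-- `ok f c`: every blind recursion chain of A out of c dies within f levels.
def pvOk (rs : List (String × List String)) : Nat → String → Prop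
  | 0, _ => False
  | f+1, c => ∀ oc ∈ pvGet rs c, pvOk rs f oc

lemma pvOk_mono (rs : List (String × List String)) : ∀ f, ∀ c, pvOk rs f c → pvOk rs (f+1) c := by
  intro f
  induction f with
  | zero => intro c h; exact h.elim
  | succ f ih => intro c h oc hoc; exact ih oc (h oc hoc)

lemma pvOk_le (rs : List (String × List String)) {f f' : Nat} (h : f ≤ f') (c : String) (hok : pvOk rs f c) : pvOk rs f' c := by
  induction h with
  | refl => exact hok
  | step _ ih => exact pvOk_mono rs _ _ ih

-- set-algebra lemmas for the merge-order argument
lemma pvUpdate_add (a b : PySem.Set String) (x : String) :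
    PySem.Set.update a (PySem.Set.add b x) = PySem.Set.add (PySem.Set.update a b) x := by
  by_cases hx : x ∈ b
  · rw [PySem.Set.add_of_mem hx, PySem.Set.add_of_mem]
    exact (PySem.Set.mem_update a b x).mpr (Or.inr hx)
  · rw [PySem.Set.add_of_not_mem hx, PySem.Set.update_append]
    rw [PySem.Set.update_cons, PySem.Set.update_nil]

lemma pvUpdate_update (a : PySem.Set String) : ∀ (l : List String) (b : PySem.Set String),
    PySem.Set.update a (PySem.Set.update b l) = PySem.Set.update (PySem.Set.update a b) l := by
  intro l
  induction l with
  | nil => intro b; rw [PySem.Set.update_nil, PySem.Set.update_nil]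
  | cons x l ih =>
    intro b
    rw [PySem.Set.update_cons, ih (PySem.Set.add b x), pvUpdate_add, PySem.Set.update_cons]

lemma pvUpdate_of_subset (a : PySem.Set String) : ∀ (l : List String), (∀ y ∈ l, y ∈ a) → PySem.Set.update a l = a := by
  intro l
  induction l generalizing a with
  | nil => intro _; exact PySem.Set.update_nil a
  | cons x l ih =>
    intro h
    rw [PySem.Set.update_cons, PySem.Set.add_of_mem (h x (by simp))]
    exact ih a (fun y hy => h y (by simp [hy]))

-- membership in A's loop result
lemma pvMem_foldl_stepA (rs : List (String × List String)) (f : Nat) :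
    ∀ (l : List String) (a : PySem.Set String) (y : String),
      (y ∈ l.foldl (pvStepA rs f) a ↔ y ∈ a ∨ ∃ z ∈ l, y = z ∨ y ∈ pvCocA rs f z none) := by
  intro l
  induction l with
  | nil => intro a y; simp
  | cons z l ih =>
    intro a y
    rw [List.foldl_cons, ih]
    constructor
    · rintro (hy | hw)
      · unfold pvStepA at hy
        rw [PySem.Set.mem_update] at hy
        rcases hy with hy | hy
        · rw [PySem.Set.mem_add] at hy
          rcases hy with hy | hy
          · exact Or.inl hy
          · exact Or.inr ⟨z, by simp, Or.inl hy⟩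
        · exact Or.inr ⟨z, by simp, Or.inr hy⟩
      · obtain ⟨w, hw1, hw2⟩ := hw
        exact Or.inr ⟨w, by simp [hw1], hw2⟩
    · rintro (hy | ⟨w, hw1, hw2⟩)
      · left
        unfold pvStepA
        rw [PySem.Set.mem_update]
        exact Or.inl ((PySem.Set.mem_add a z y).mpr (Or.inl hy))
      · rcases List.mem_cons.mp hw1 with hw1 | hw1
        · subst hw1
          left
          unfold pvStepA
          rw [PySem.Set.mem_update]
          rcases hw2 with h | h
          · exact Or.inl ((PySem.Set.mem_add a w y).mpr (Or.inr h))
          · exact Or.inr h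
        · exact Or.inr ⟨w, hw1, hw2⟩

-- in particular A's loop only grows the accumulator
lemma pvMem_foldl_stepA_of_mem (rs : List (String × List String)) (f : Nat) (l : List String) (a : PySem.Set String) (y : String) (hy : y ∈ a) :
    y ∈ l.foldl (pvStepA rs f) a :=
  (pvMem_foldl_stepA rs f l a y).mpr (Or.inl hy)

-- A's fresh result is fuel-independent once the fuel suffices
lemma pvCocA_stable (rs : List (String × List String)) : ∀ f, ∀ c, pvOk rs f c → pvCocA rs (f+1) c none = pvCocA rs f c none := by
  intro f
  induction f with
  | zero => intro c h; exact h.elim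
  | succ f ih =>
    intro c h
    rw [pvCocA_succ, pvCocA_succ]
    split
    · rfl
    · exact PySem.List.foldl_congr_mem _ _ _ _
        (fun a oc hoc => by unfold pvStepA; rw [ih oc (h oc hoc)])

lemma pvCocA_add (rs : List (String × List String)) (f d : Nat) (c : String) (h : pvOk rs f c) :
    pvCocA rs (f + d) c none = pvCocA rs f c none := by
  induction d with
  | zero => rfl
  | succ d ih =>
    rw [show f + (d+1) = (f+d) + 1 by ring,
      pvCocA_stable rs (f+d) c (pvOk_le rs (Nat.le_add_right f d) c h), ih]

lemma pvCocA_eq_of_ok (rs : List (String × List String)) {f f' : Nat} (c : String) (h : pvOk rs f c) (h' : pvOk rs f' c) :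
    pvCocA rs f c none = pvCocA rs f' c none := by
  rcases Nat.le_total f f' with hle | hle
  · obtain ⟨d, rfl⟩ := Nat.exists_eq_add_of_le hle
    exact (pvCocA_add rs f d c h).symm
  · obtain ⟨d, rfl⟩ := Nat.exists_eq_add_of_le hle
    exact pvCocA_add rs f' d c h'

-- invariant: every explored color, and everything A would freshly compute for it, is in the result
def pvInv (rs : List (String × List String)) (exp res : PySem.Set String) : Prop :=
  ∀ x ∈ exp, x ∈ res ∧ ∀ f, pvOk rs f x → ∀ y ∈ pvCocA rs f x none, y ∈ res

lemma pvInv_mono (rs : List (String × List String)) (exp res res' : PySem.Set String)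
    (h : pvInv rs exp res) (hsub : ∀ y ∈ res, y ∈ res') : pvInv rs exp res' := by
  intro x hx
  exact ⟨hsub x (h x hx).1, fun f hf y hy => hsub y ((h x hx).2 f hf y hy)⟩

-- A's fresh fold from ∅ merged into `a` is the same fold started at `a`
lemma pvUpdate_foldA (rs : List (String × List String)) (f : Nat) :
    ∀ (l : List String) (a b : PySem.Set String),
      PySem.Set.update a (l.foldl (pvStepA rs f) b) = l.foldl (pvStepA rs f) (PySem.Set.update a b) := by
  intro l
  induction l with
  | nil => intro a b; simp
  | cons z l ih =>
    intro a b
    rw [List.foldl_cons, List.foldl_cons, ih]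
    congr 1
    unfold pvStepA
    rw [pvUpdate_update, pvUpdate_add]

-- MAIN LEMMA: B's fold over a worklist computes exactly A's fold, and maintains the invariant
lemma pvMain (rs : List (String × List String)) : ∀ (f : Nat) (l : List String) (exp res : PySem.Set String),
    (∀ oc ∈ l, pvOk rs f oc) → pvInv rs exp res →
    (pvFoldB rs f (exp, res) l).2 = l.foldl (pvStepA rs f) res ∧
      pvInv rs (pvFoldB rs f (exp, res) l).1 (pvFoldB rs f (exp, res) l).2 := by
  intro f
  induction f with
  | zero =>
    intro l exp res hok hinv
    cases l with
    | nil => exact ⟨rfl, hinv⟩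
    | cons oc l => exact absurd (hok oc (by simp)) (by simp [pvOk])
  | succ f ih =>
    intro l
    induction l with
    | nil => intro exp res _ hinv; exact ⟨rfl, hinv⟩
    | cons oc l ihl =>
      intro exp res hok hinv
      have hok_oc : pvOk rs (f+1) oc := hok oc (by simp)
      have hok_l : ∀ z ∈ l, pvOk rs (f+1) z := fun z hz => hok z (by simp [hz])
      by_cases hmem : oc ∈ exp
      · -- already explored: B skips; A's step adds nothing new
        have hstep : pvStepA rs (f+1) res oc = res := by
          unfold pvStepA
          rw [PySem.Set.add_of_mem (hinv oc hmem).1]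
          exact pvUpdate_of_subset res _ ((hinv oc hmem).2 (f+1) hok_oc)
        have hB : pvFoldB rs (f+1) (exp, res) (oc :: l) = pvFoldB rs (f+1) (exp, res) l := by
          unfold pvFoldB
          rw [List.foldl_cons]
          simp [hmem]
        rw [hB, List.foldl_cons, hstep]
        exact ihl exp res hok_l hinv
      · -- unexplored: B visits oc; the visit computes exactly A's step
        have hB : pvFoldB rs (f+1) (exp, res) (oc :: l) =
            pvFoldB rs (f+1) (pvVisitB rs (f+1) oc (exp, res)) l := by
          unfold pvFoldB
          rw [List.foldl_cons]
          simp [hmem]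
        set t := pvFoldB rs f (exp, PySem.Set.add res oc) (pvGet rs oc) with ht
        have hchildren : ∀ z ∈ pvGet rs oc, pvOk rs f z := hok_oc
        have hinv' : pvInv rs exp (PySem.Set.add res oc) :=
          pvInv_mono rs exp res _ hinv (fun y hy => (PySem.Set.mem_add res oc y).mpr (Or.inl hy))
        obtain ⟨ht2, htInv⟩ := ih (pvGet rs oc) exp (PySem.Set.add res oc) hchildren hinv'
        -- A's step equals the visit's result set
        have hstep : pvStepA rs (f+1) res oc = t.2 := by
          unfold pvStepA
          rw [pvCocA_succ, ht2]
          split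
          · next hnil => rw [hnil]; simp
          · rw [pvUpdate_foldA]
            rfl
        -- oc itself lands in the result
        have hoc_t2 : oc ∈ t.2 := by
          rw [ht2]
          exact pvMem_foldl_stepA_of_mem rs f _ _ oc ((PySem.Set.mem_add res oc oc).mpr (Or.inr rfl))
        -- invariant after marking oc explored
        have hinv2 : pvInv rs (PySem.Set.add t.1 oc) t.2 := by
          intro x hx
          rcases (PySem.Set.mem_add t.1 oc x).mp hx with hx | hx
          · exact htInv x hx
          · subst hx
            refine ⟨hoc_t2, fun f2 hf2 y hy => ?_⟩
            rw [pvCocA_eq_of_ok rs x hf2 hok_oc, pvCocA_succ] at hy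
            rw [ht2]
            split at hy
            · simp at hy
            · rcases (pvMem_foldl_stepA rs f _ _ y).mp hy with hy | ⟨z, hz1, hz2⟩
              · simp at hy
              · exact (pvMem_foldl_stepA rs f _ _ y).mpr (Or.inr ⟨z, hz1, hz2⟩)
        have hvis : pvVisitB rs (f+1) oc (exp, res) = (PySem.Set.add t.1 oc, t.2) := by
          rw [pvVisitB_succ]
        rw [hB, hvis, List.foldl_cons, hstep]
        exact ihl (PySem.Set.add t.1 oc) t.2 hok_l hinv2

-- ---- bridging Pre_ to pvOk: an exhausted fuel yields a long chain, a long chain a reachable cycle ----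

def pvChain (rs : List (String × List String)) : String → List String → Prop
  | _, [] => True
  | c, x :: xs => x ∈ pvGet rs c ∧ pvChain rs x xs

lemma pvNotOk_chain (rs : List (String × List String)) : ∀ f c, ¬ pvOk rs f c → ∃ p, pvChain rs c p ∧ p.length = f := by
  intro f
  induction f with
  | zero => intro c _; exact ⟨[], trivial, rfl⟩
  | succ f ih =>
    intro c h
    unfold pvOk at h
    push_neg at h
    obtain ⟨oc, hoc, hnok⟩ := h
    obtain ⟨p, hp, hlen⟩ := ih oc hnok
    exact ⟨oc :: p, ⟨hoc, hp⟩, by simp [hlen]⟩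

lemma pvMem_foldl_update (rs : List (String × List String)) :
    ∀ (l : List String) (a : PySem.Set String) (y : String),
      (y ∈ l.foldl (fun acc c => PySem.Set.update acc (pvGet rs c)) a ↔ y ∈ a ∨ ∃ x ∈ l, y ∈ pvGet rs x) := by
  intro l
  induction l with
  | nil => intro a y; simp
  | cons x l ih =>
    intro a y
    rw [List.foldl_cons, ih]
    rw [PySem.Set.mem_update]
    constructor
    · rintro ((h | h) | ⟨w, hw1, hw2⟩)
      · exact Or.inl h
      · exact Or.inr ⟨x, by simp, h⟩
      · exact Or.inr ⟨w, by simp [hw1], hw2⟩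
    · rintro (h | ⟨w, hw1, hw2⟩)
      · exact Or.inl (Or.inl h)
      · rcases List.mem_cons.mp hw1 with hw1 | hw1
        · subst hw1; exact Or.inl (Or.inr hw2)
        · exact Or.inr ⟨w, hw1, hw2⟩

lemma pvMem_stepR (rs : List (String × List String)) (S : List String) (y : String) :
    y ∈ pvStepR rs S ↔ y ∈ S ∨ ∃ x ∈ S, y ∈ pvGet rs x := pvMem_foldl_update rs S S y

lemma pvIterR_mono (rs : List (String × List String)) : ∀ (n : Nat) (S T : List String),
    (∀ y ∈ S, y ∈ T) → ∀ y ∈ pvIterR rs S n, y ∈ pvIterR rs T n := by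
  intro n
  induction n with
  | zero => intro S T h y hy; exact h y hy
  | succ n ih =>
    intro S T h y hy
    refine ih (pvStepR rs S) (pvStepR rs T) ?_ y hy
    intro z hz
    rcases (pvMem_stepR rs S z).mp hz with hz | ⟨x, hx1, hx2⟩
    · exact (pvMem_stepR rs T z).mpr (Or.inl (h z hz))
    · exact (pvMem_stepR rs T z).mpr (Or.inr ⟨x, h x hx1, hx2⟩)

lemma pvSub_iterR (rs : List (String × List String)) : ∀ (n : Nat) (S : List String), ∀ y ∈ S, y ∈ pvIterR rs S n := by
  intro n
  induction n with
  | zero => intro S y hy; exact hy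
  | succ n ih =>
    intro S y hy
    exact ih (pvStepR rs S) y ((pvMem_stepR rs S y).mpr (Or.inl hy))

lemma pvChain_mem_iterR (rs : List (String × List String)) : ∀ (p : List String) (c x : String),
    pvChain rs c p → x ∈ p → ∀ n, p.length ≤ n + 1 → x ∈ pvIterR rs (pvGet rs c) n := by
  intro p
  induction p with
  | nil => intro c x _ hx; simp at hx
  | cons hd tl ih =>
    intro c x hch hx n hlen
    obtain ⟨h1, h2⟩ := hch
    rcases List.mem_cons.mp hx with hx | hx
    · subst hx; exact pvSub_iterR rs n _ x h1
    · cases n with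
      | zero =>
        cases tl with
        | nil => simp at hx
        | cons a b => simp at hlen
      | succ n =>
        have hx' : x ∈ pvIterR rs (pvGet rs hd) n := ih hd x h2 hx n (by simp at hlen; omega)
        show x ∈ pvIterR rs (pvStepR rs (pvGet rs c)) n
        refine pvIterR_mono rs n _ _ ?_ x hx'
        intro z hz
        exact (pvMem_stepR rs (pvGet rs c) z).mpr (Or.inr ⟨hd, h1, hz⟩)

lemma pvChain_take (rs : List (String × List String)) : ∀ (p : List String) (c : String) (k : Nat),
    pvChain rs c p → pvChain rs c (p.take k) := by
  intro p
  induction p with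
  | nil => intro c k _; rw [List.take_nil]; trivial
  | cons hd tl ih =>
    intro c k hch
    cases k with
    | zero => trivial
    | succ k => exact ⟨hch.1, ih hd k hch.2⟩

lemma pvChain_keys (rs : List (String × List String)) : ∀ (p : List String) (c : String),
    pvChain rs c p → ∀ x ∈ p.dropLast, pvGet rs x ≠ [] := by
  intro p
  induction p with
  | nil => intro c _ x hx; simp at hx
  | cons hd tl ih =>
    intro c hch x hx
    cases tl with
    | nil => simp at hx
    | cons h2 t2 =>
      rw [List.dropLast_cons₂] at hx
      rcases List.mem_cons.mp hx with hx | hx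
      · subst hx
        exact List.ne_nil_of_mem hch.2.1
      · exact ih hd hch.2 x hx

lemma pvKey_of_get_ne_nil (rs : List (String × List String)) (x : String) (h : pvGet rs x ≠ []) :
    x ∈ rs.map Prod.fst := by
  by_contra hx
  have : (PySem.Dict.mk rs).get? x = none := by
    rw [PySem.Dict.get?_eq_none_iff_not_mem_keys]
    rw [PySem.Dict.keys_mk]
    exact hx
  exact h (by unfold pvGet; rw [this]; rfl)

lemma pvChain_suffix (rs : List (String × List String)) : ∀ (p : List String) (c a : String),
    pvChain rs c p → [a, a].Sublist p → ∃ q, pvChain rs a q ∧ a ∈ q ∧ q.length ≤ p.length := by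
  intro p
  induction p with
  | nil => intro c a _ hsub; simp at hsub
  | cons hd tl ih =>
    intro c a hch hsub
    cases hsub with
    | cons _ h =>
      obtain ⟨q, hq1, hq2, hq3⟩ := ih hd a hch.2 h
      exact ⟨q, hq1, hq2, by simp; omega⟩
    | cons₂ _ h =>
      exact ⟨tl, hch.2, h.subset (by simp), by simp⟩

lemma pvPre_ok (rs : List (String × List String)) (color : String)
    (pre : ∀ c ∈ pvReach rs color, c ∉ pvReach rs c) : pvOk rs (rs.length + 2) color := by
  by_contra hnok
  obtain ⟨p, hch, hlen⟩ := pvNotOk_chain rs _ color hnok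
  set q := p.dropLast with hq
  have hlq : q.length = rs.length + 1 := by
    rw [hq, List.length_dropLast, hlen]
    omega
  have hchq : pvChain rs color q := by
    rw [hq, List.dropLast_eq_take]
    exact pvChain_take rs p color _ hch
  have hndq : ¬ q.Nodup := by
    intro hnd
    have hsub : ∀ x ∈ q, x ∈ rs.map Prod.fst := fun x hx =>
      pvKey_of_get_ne_nil rs x (pvChain_keys rs p color hch x (hq ▸ hx))
    have : q.length ≤ (rs.map Prod.fst).length := by
      calc q.length = q.toFinset.card := (List.toFinset_card_of_nodup hnd).symm
        _ ≤ (rs.map Prod.fst).toFinset.card :=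
            Finset.card_le_card (fun x hx => by simpa using hsub x (by simpa using hx))
        _ ≤ (rs.map Prod.fst).length := (rs.map Prod.fst).toFinset_card_le
    simp at this
    omega
  obtain ⟨a, hdup⟩ := List.exists_duplicate_iff_not_nodup.mpr hndq
  have hsubl : [a, a].Sublist q := List.duplicate_iff_sublist.mp hdup
  obtain ⟨q', hq'1, hq'2, hq'3⟩ := pvChain_suffix rs q color a hchq hsubl
  have haa : a ∈ pvReach rs a :=
    pvChain_mem_iterR rs q' a a hq'1 hq'2 (rs.length + 1) (by omega)
  have hac : a ∈ pvReach rs color :=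
    pvChain_mem_iterR rs q color a hchq (hdup.mem) (rs.length + 1) (by omega)
  exact pre a hac haa

-- ===== VERDICT (by name: the statement is the Claim_ definition above) =====
theorem count_outer_colors_spec : Claim_equal_count_outer_colors := by
  intro color rs acc _dom pre
  have halt : count_outer_colors_alt color rs acc =
      if pvGet rs color = [] then []
      else (pvFoldB rs (rs.length + 1) (PySem.Set.empty, PySem.Set.ofList (acc.getD [])) (pvGet rs color)).2 := rfl
  unfold Spec_count_outer_colors count_outer_colors
  rw [pvCocA_succ, halt]
  by_cases hnil : pvGet rs color = []
  · simp [hnil]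
  · simp only [hnil, if_false]
    have hok : pvOk rs (rs.length + 2) color := pvPre_ok rs color pre
    have hchildren : ∀ oc ∈ pvGet rs color, pvOk rs (rs.length + 1) oc := hok
    have hinv0 : pvInv rs PySem.Set.empty (PySem.Set.ofList (acc.getD [])) := by
      intro x hx
      simp [PySem.Set.empty] at hx
    obtain ⟨h1, _⟩ := pvMain rs (rs.length + 1) (pvGet rs color) PySem.Set.empty
      (PySem.Set.ofList (acc.getD [])) hchildren hinv0
    exact h1.symm
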